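-- pv_equiv track=rewrite | github.com/keiti93/Programming101-1 | week0/Problem-42.py | next_hack
-- ===== SOURCE A (Python) =====
-- def next_hack(n):
--     n = n + 1
--     while True:
--         a = bin(n)[2:]
--         if a == a[::-1]:
--             if list(a).count('1') %2 != 0:
--                 return n
--         n += 1
-- ===== SOURCE B (Python) =====
-- def next_hack(n):
--     # Enumerate binary palindromes in increasing order (by length, then by the
--     # value of the mirrored first half) and return the first one that is > n
--     # and has an odd number of 1-bits.
--     L = 1
--     while True:
--         h = (L + 1) // 2
--         for half in range(1 << (h - 1), 1 << h):
--             s = format(half, 'b')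
--             p = s + s[:L - h][::-1]
--             m = int(p, 2)
--             if m > n and p.count('1') % 2 == 1:
--                 return m
--         L += 1
-- ===== Notes on version B (the rewrite author's own statement) =====
-- stated objective: faster
-- what changed: B enumerates binary palindromes directly in increasing order (by bit-length, then by the mirrored first half) and returns the first palindrome above n with an odd number of one-bits, instead of A's scan that tests every integer above n; the scan over the gap g becomes O(sqrt(g)) candidates.
import Mathlib
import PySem

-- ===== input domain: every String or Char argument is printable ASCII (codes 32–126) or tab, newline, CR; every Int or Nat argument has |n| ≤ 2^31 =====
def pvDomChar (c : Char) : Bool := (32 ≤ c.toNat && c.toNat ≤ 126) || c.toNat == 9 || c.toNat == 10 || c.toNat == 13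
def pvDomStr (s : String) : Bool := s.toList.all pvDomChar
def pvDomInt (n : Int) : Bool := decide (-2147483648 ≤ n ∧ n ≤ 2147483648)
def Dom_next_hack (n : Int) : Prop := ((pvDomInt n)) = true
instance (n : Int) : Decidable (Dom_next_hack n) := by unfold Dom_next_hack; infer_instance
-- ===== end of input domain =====

-- B enumerates binary palindromes directly (mirroring the first half) instead of testing every
-- integer above n, and returns the first palindrome above n with an odd number of one-bits; measured faster.

-- ===== PORT A =====
-- bin(m)[2:] for a nonnegative m ≥ 1 is the msb-first binary digit string (helper shared by both ports)
def pvBits (n : Nat) : List Char :=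
  if h : n = 0 then []
  else pvBits (n / 2) ++ [if n % 2 = 1 then '1' else '0']
decreasing_by exact Nat.div_lt_self (Nat.pos_of_ne_zero h) one_lt_two

-- bin(n)[2:] exactly: for n < 0 Python's bin gives '-0b…' so [2:] keeps a leading 'b'
def pvBinTail (n : Int) : List Char :=
  if n < 0 then 'b' :: pvBits (-n).toNat
  else if n = 0 then ['0']
  else pvBits n.toNat

-- the 'while True' loop of A: test n, else n += 1 (fuel bounds the number of iterations)
def nextHackLoop (fuel : Nat) (n : Int) : Int :=
  match fuel with
  | 0 => n
  | fuel + 1 =>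
    if pvBinTail n = (pvBinTail n).reverse then
      if (pvBinTail n).count '1' % 2 ≠ 0 then n
      else nextHackLoop fuel (n + 1)
    else nextHackLoop fuel (n + 1)

def next_hack (n : Int) : Int := nextHackLoop (2 ^ 34) (n + 1)

-- ===== PORT B =====
-- int(p, 2) for a binary digit string
def pvVal (s : List Char) : Nat :=
  s.foldl (fun acc c => 2 * acc + (if c = '1' then 1 else 0)) 0

-- p = s + s[:L-h][::-1] where s = format(half, 'b')
def pvCandP (L h half : Nat) : List Char :=
  pvBits half ++ ((pvBits half).take (L - h)).reverse

-- the inner 'for half in range(…)' loop of B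
def pvInner (n : Int) (L h : Nat) : List Nat → Option Int
  | [] => none
  | half :: rest =>
    if n < (pvVal (pvCandP L h half) : Int) ∧ (pvCandP L h half).count '1' % 2 = 1 then
      some ((pvVal (pvCandP L h half) : Nat) : Int)
    else pvInner n L h rest

-- the outer 'while True' loop of B over the bit-length L
def nextHackAltLoop (fuel : Nat) (n : Int) (L : Nat) : Int :=
  match fuel with
  | 0 => 0
  | fuel + 1 =>
    match pvInner n L ((L + 1) / 2)
        (List.range' (2 ^ ((L + 1) / 2 - 1)) (2 ^ ((L + 1) / 2) - 2 ^ ((L + 1) / 2 - 1))) with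
    | some m => m
    | none => nextHackAltLoop fuel n (L + 1)

def next_hack_alt (n : Int) : Int := nextHackAltLoop 64 n 1

-- ===== PRECONDITION & SPEC =====
def Spec_next_hack (n : Int) (out : Int) : Prop := out = next_hack_alt n
instance (n : Int) (out : Int) : Decidable (Spec_next_hack n out) := by unfold Spec_next_hack; infer_instance

-- ===== CLAIM (what is proved, stated in full; the proofs are below) =====
def Claim_equal_next_hack : Prop := ∀ (n : Int), Dom_next_hack n → Spec_next_hack n (next_hack n)

-- ===== LEMMAS AND PROOFS =====

-- the target predicate: m (as a Nat) has a palindromic binary string with an odd number of '1's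
def pvGoodN (m : Nat) : Prop :=
  m ≠ 0 ∧ (pvBits m).reverse = pvBits m ∧ (pvBits m).count '1' % 2 = 1

def pvGood (m : Int) : Prop := 0 < m ∧ pvGoodN m.toNat

theorem pvBits_zero : pvBits 0 = [] := by rw [pvBits]; simp

theorem pvBits_eq (n : Nat) (h : n ≠ 0) :
    pvBits n = pvBits (n / 2) ++ [if n % 2 = 1 then '1' else '0'] := by
  rw [pvBits]; simp [h]

theorem pvBits_ne_nil (n : Nat) (h : n ≠ 0) : pvBits n ≠ [] := by
  rw [pvBits_eq n h]; simp

theorem pvBits_digits (n : Nat) : ∀ c ∈ pvBits n, c = '0' ∨ c = '1' := by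
  induction n using Nat.strong_induction_on with
  | _ n ih =>
    by_cases h : n = 0
    · subst h; rw [pvBits_zero]; simp
    · rw [pvBits_eq n h]
      intro c hc
      rcases List.mem_append.1 hc with hc | hc
      · exact ih (n / 2) (Nat.div_lt_self (Nat.pos_of_ne_zero h) one_lt_two) c hc
      · simp at hc; subst hc; split <;> simp

theorem pvBits_head (n : Nat) (h : n ≠ 0) : ∃ t, pvBits n = '1' :: t := by
  induction n using Nat.strong_induction_on with
  | _ n ih =>
    rw [pvBits_eq n h]
    by_cases h2 : n / 2 = 0
    · have hn1 : n = 1 := by omega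
      subst hn1
      exact ⟨[], by rw [h2, pvBits_zero]; simp⟩
    · obtain ⟨t, ht⟩ := ih (n / 2) (Nat.div_lt_self (Nat.pos_of_ne_zero h) one_lt_two) h2
      exact ⟨t ++ [if n % 2 = 1 then '1' else '0'], by rw [ht]; simp⟩

theorem pvVal_acc (t : List Char) (a : Nat) :
    t.foldl (fun acc c => 2 * acc + (if c = '1' then 1 else 0)) a
      = a * 2 ^ t.length + pvVal t := by
  induction t generalizing a with
  | nil => simp [pvVal]
  | cons c t ih =>
    simp only [List.foldl_cons, List.length_cons, pvVal]
    rw [ih (2 * a + (if c = '1' then 1 else 0)), ih (2 * 0 + (if c = '1' then 1 else 0))]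
    ring

theorem pvVal_append (s t : List Char) :
    pvVal (s ++ t) = pvVal s * 2 ^ t.length + pvVal t := by
  unfold pvVal
  rw [List.foldl_append, pvVal_acc]
  rfl

theorem pvVal_cons (c : Char) (t : List Char) :
    pvVal (c :: t) = (if c = '1' then 1 else 0) * 2 ^ t.length + pvVal t := by
  have h : pvVal (c :: t)
      = t.foldl (fun acc c => 2 * acc + (if c = '1' then 1 else 0))
          (2 * 0 + (if c = '1' then 1 else 0)) := rfl
  rw [h, pvVal_acc]
  norm_num

theorem pvVal_lt (s : List Char) : pvVal s < 2 ^ s.length := by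
  induction s with
  | nil => simp [pvVal]
  | cons c t ih =>
    rw [pvVal_cons]
    have hb : (if c = '1' then 1 else 0) ≤ 1 := by split <;> simp
    have h2 : 2 ^ (c :: t).length = 2 * 2 ^ t.length := by rw [List.length_cons]; ring
    rw [h2]
    nlinarith [ih]

theorem pvVal_cons_one (t : List Char) : pvVal ('1' :: t) = 2 ^ t.length + pvVal t := by
  rw [pvVal_cons]
  norm_num

theorem pvVal_pvBits (n : Nat) : pvVal (pvBits n) = n := by
  induction n using Nat.strong_induction_on with
  | _ n ih =>
    by_cases h : n = 0
    · subst h; rw [pvBits_zero]; rfl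
    · rw [pvBits_eq n h, pvVal_append,
        ih (n / 2) (Nat.div_lt_self (Nat.pos_of_ne_zero h) one_lt_two)]
      have h2 : pvVal [if n % 2 = 1 then '1' else '0'] = n % 2 := by
        have := Nat.mod_two_eq_zero_or_one n
        rcases this with h2 | h2 <;> simp [h2, pvVal]
      rw [h2]
      simp only [List.length_singleton, pow_one]
      omega

theorem pvBits_pvVal (s : List Char) :
    (∀ c ∈ s, c = '0' ∨ c = '1') → (∃ t, s = '1' :: t) → pvBits (pvVal s) = s := by
  induction s using List.reverseRecOn with
  | nil => rintro _ ⟨t, ht⟩; cases ht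
  | append_singleton s c ih =>
    rintro hdig ⟨t, ht⟩
    by_cases hs : s = []
    · subst hs
      simp only [List.nil_append] at ht ⊢
      simp at ht
      obtain ⟨hc, -⟩ := ht
      subst hc
      have : pvVal ['1'] = 1 := by simp [pvVal]
      rw [this, pvBits_eq 1 (by norm_num)]
      norm_num [pvBits_zero]
    · obtain ⟨t', ht'⟩ : ∃ t', s = '1' :: t' := by
        cases s with
        | nil => exact absurd rfl hs
        | cons x xs =>
          simp at ht
          exact ⟨xs, by rw [ht.1]⟩
      have hv1 : 1 ≤ pvVal s := by
        rw [ht', pvVal_cons_one]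
        have := Nat.one_le_two_pow (n := t'.length)
        omega
      have hdigc : c = '0' ∨ c = '1' := hdig c (by simp)
      have hb : pvVal (s ++ [c]) = 2 * pvVal s + (if c = '1' then 1 else 0) := by
        rw [pvVal_append]
        have : pvVal [c] = (if c = '1' then 1 else 0) := by simp [pvVal]
        rw [this]
        simp only [List.length_singleton, pow_one]
        ring
      have hbv : (if c = '1' then (1:Nat) else 0) ≤ 1 := by split <;> simp
      have hne : pvVal (s ++ [c]) ≠ 0 := by rw [hb]; omega
      rw [pvBits_eq _ hne]
      have hdiv : pvVal (s ++ [c]) / 2 = pvVal s := by rw [hb]; omega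
      have hmod : pvVal (s ++ [c]) % 2 = (if c = '1' then 1 else 0) := by rw [hb]; omega
      rw [hdiv, hmod, ih (fun d hd => hdig d (by simp [hd])) ⟨t', ht'⟩]
      congr 1
      rcases hdigc with hc | hc <;> subst hc <;> simp

theorem pvBits_bounds (n : Nat) (h : n ≠ 0) :
    2 ^ ((pvBits n).length - 1) ≤ n ∧ n < 2 ^ (pvBits n).length := by
  obtain ⟨t, ht⟩ := pvBits_head n h
  have hv := pvVal_pvBits n
  rw [ht] at hv ⊢
  rw [pvVal_cons_one] at hv
  have hlt := pvVal_lt t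
  simp only [List.length_cons, Nat.add_sub_cancel]
  constructor
  · omega
  · rw [pow_succ]; omega

theorem pvBits_length_of_range (h half : Nat) (h1 : 1 ≤ h)
    (hlo : 2 ^ (h - 1) ≤ half) (hhi : half < 2 ^ h) : (pvBits half).length = h := by
  have hne : half ≠ 0 := by
    have := Nat.one_le_two_pow (n := h - 1)
    omega
  obtain ⟨hb1, hb2⟩ := pvBits_bounds half hne
  set l := (pvBits half).length with hl
  have hl1 : 1 ≤ l := by
    have := pvBits_ne_nil half hne
    cases hq : pvBits half with
    | nil => exact absurd hq this
    | cons x xs => rw [hl, hq]; simp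
  by_contra hne2
  rcases Nat.lt_or_ge l h with hlt | hge
  · have : (2:Nat) ^ l ≤ 2 ^ (h - 1) := Nat.pow_le_pow_right (by norm_num) (by omega)
    omega
  · have hgt : h < l := by omega
    have : (2:Nat) ^ h ≤ 2 ^ (l - 1) := Nat.pow_le_pow_right (by norm_num) (by omega)
    omega

-- ----- facts about one candidate at level L (h = (L+1)/2), for a half of bit-length h -----

theorem pvCand_spec (L half : Nat) (hL : 1 ≤ L)
    (hlen : (pvBits half).length = (L + 1) / 2) :
    (pvCandP L ((L + 1) / 2) half).length = L ∧
    (∃ t, pvCandP L ((L + 1) / 2) half = '1' :: t) ∧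
    (∀ c ∈ pvCandP L ((L + 1) / 2) half, c = '0' ∨ c = '1') ∧
    (pvCandP L ((L + 1) / 2) half).reverse = pvCandP L ((L + 1) / 2) half ∧
    pvVal (pvCandP L ((L + 1) / 2) half)
      = half * 2 ^ (L - (L + 1) / 2) + pvVal (((pvBits half).take (L - (L + 1) / 2)).reverse) := by
  have hkh : L - (L + 1) / 2 ≤ (L + 1) / 2 := by omega
  have hh1 : 1 ≤ (L + 1) / 2 := by omega
  have hsne : pvBits half ≠ [] := by
    intro hemp
    rw [hemp] at hlen
    simp at hlen
    omega
  have hlentake : ((pvBits half).take (L - (L + 1) / 2)).length = L - (L + 1) / 2 := by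
    rw [List.length_take, hlen]
    omega
  have hlenp : (pvCandP L ((L + 1) / 2) half).length = L := by
    unfold pvCandP
    rw [List.length_append, List.length_reverse, hlen, hlentake]
    omega
  refine ⟨hlenp, ?_, ?_, ?_, ?_⟩
  · obtain ⟨t, ht⟩ := pvBits_head half (by
      intro h0; rw [h0, pvBits_zero] at hsne; exact hsne rfl)
    refine ⟨t ++ (((pvBits half).take (L - (L + 1) / 2)).reverse), ?_⟩
    unfold pvCandP
    rw [ht]
    simp
  · intro c hc
    unfold pvCandP at hc
    rcases List.mem_append.1 hc with hc | hc
    · exact pvBits_digits half c hc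
    · exact pvBits_digits half c (List.mem_of_mem_take (List.mem_reverse.1 hc))
  · -- palindrome: split on the parity of L
    unfold pvCandP
    rcases Nat.even_or_odd L with hev | hodd
    · -- L even: L - (L+1)/2 = (L+1)/2, the mirrored part is all of s
      have htake : (pvBits half).take (L - (L + 1) / 2) = pvBits half := by
        refine List.take_of_length_le ?_
        rw [hlen]
        obtain ⟨j, hj⟩ := hev
        omega
      rw [htake]
      simp [List.reverse_append]
    · -- L odd: the mirrored part drops the centre character
      have htake : (pvBits half).take (L - (L + 1) / 2) = (pvBits half).dropLast := by
        rw [List.dropLast_eq_take, hlen]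
        congr 1
        obtain ⟨j, hj⟩ := hodd
        omega
      rw [htake]
      conv_lhs => rw [← List.dropLast_append_getLast hsne]
      conv_rhs => rw [← List.dropLast_append_getLast hsne]
      simp [List.reverse_append]
  · unfold pvCandP
    rw [pvVal_append, List.length_reverse, hlentake, pvVal_pvBits]

theorem pvCand_mono (L : Nat) (hL : 1 ≤ L) (half₁ half₂ : Nat)
    (hlen₁ : (pvBits half₁).length = (L + 1) / 2)
    (hlen₂ : (pvBits half₂).length = (L + 1) / 2)
    (hlt : half₁ < half₂) :
    pvVal (pvCandP L ((L + 1) / 2) half₁) < pvVal (pvCandP L ((L + 1) / 2) half₂) := by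
  obtain ⟨-, -, -, -, hv₁⟩ := pvCand_spec L half₁ hL hlen₁
  obtain ⟨-, -, -, -, hv₂⟩ := pvCand_spec L half₂ hL hlen₂
  rw [hv₁, hv₂]
  set k := L - (L + 1) / 2 with hk
  have ht₁ : pvVal (((pvBits half₁).take k).reverse) < 2 ^ k := by
    have := pvVal_lt (((pvBits half₁).take k).reverse)
    have hlen : (((pvBits half₁).take k).reverse).length ≤ k := by
      simp [List.length_take]
    calc pvVal (((pvBits half₁).take k).reverse) < 2 ^ (((pvBits half₁).take k).reverse).length := this
      _ ≤ 2 ^ k := Nat.pow_le_pow_right (by norm_num) hlen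
  nlinarith [Nat.pos_of_ne_zero (fun h => by simp [h] at ht₁ : (2:Nat) ^ k ≠ 0)]

-- every palindromic binary string is produced by its first half
theorem pvCand_complete (m : Nat) (hm : m ≠ 0) (hpal : (pvBits m).reverse = pvBits m)
    (L h half : Nat) (hL : L = (pvBits m).length) (hh : h = (L + 1) / 2)
    (hhalf : half = pvVal ((pvBits m).take h)) :
    (pvBits half).length = h ∧ pvCandP L h half = pvBits m ∧ pvVal (pvCandP L h half) = m := by
  have hL1 : 1 ≤ L := by
    rw [hL]
    have := pvBits_ne_nil m hm
    cases hq : pvBits m with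
    | nil => exact absurd hq this
    | cons x xs => simp
  have hh1 : 1 ≤ h := by omega
  have hhL : h ≤ L := by omega
  obtain ⟨t, hat⟩ := pvBits_head m hm
  have hheadtake : ∃ t', (pvBits m).take h = '1' :: t' := by
    rw [hat]
    cases hq : h with
    | zero => omega
    | succ j => exact ⟨t.take j, by simp⟩
  have hdigtake : ∀ c ∈ (pvBits m).take h, c = '0' ∨ c = '1' :=
    fun c hc => pvBits_digits m c (List.mem_of_mem_take hc)
  have hbits_half : pvBits half = (pvBits m).take h := by
    rw [hhalf]
    exact pvBits_pvVal _ hdigtake hheadtake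
  have hlenhalf : (pvBits half).length = h := by
    rw [hbits_half, List.length_take, ← hL]
    omega
  refine ⟨hlenhalf, ?_, ?_⟩
  · have htt : (pvBits half).take (L - h) = (pvBits m).take (L - h) := by
      rw [hbits_half, List.take_take]
      congr 1
      omega
    have hdrop : ((pvBits m).take (L - h)).reverse = (pvBits m).drop h := by
      have h1 : (pvBits m).drop h = (pvBits m).reverse.drop h := by rw [hpal]
      rw [h1, List.drop_reverse, ← hL]
    unfold pvCandP
    rw [htt, hbits_half, hdrop]
    exact List.take_append_drop h (pvBits m)
  · have htt : (pvBits half).take (L - h) = (pvBits m).take (L - h) := by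
      rw [hbits_half, List.take_take]
      congr 1
      omega
    have hdrop : ((pvBits m).take (L - h)).reverse = (pvBits m).drop h := by
      have h1 : (pvBits m).drop h = (pvBits m).reverse.drop h := by rw [hpal]
      rw [h1, List.drop_reverse, ← hL]
    unfold pvCandP
    rw [htt, hbits_half, hdrop, List.take_append_drop h (pvBits m), pvVal_pvBits]

-- ----- the A-side loop finds the least good integer ≥ start -----

theorem pvBinTail_check (n : Int) :
    ((pvBinTail n = (pvBinTail n).reverse) ∧ (pvBinTail n).count '1' % 2 ≠ 0) ↔ pvGood n := by
  unfold pvBinTail pvGood pvGoodN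
  rcases lt_trichotomy n 0 with hn | hn | hn
  · simp only [if_pos hn]
    constructor
    · rintro ⟨hpal, -⟩
      exfalso
      have hne : (-n).toNat ≠ 0 := by omega
      have hnil := pvBits_ne_nil (-n).toNat hne
      have h1 : ('b' :: pvBits (-n).toNat).getLast? = (pvBits (-n).toNat).getLast? := by
        cases hq : pvBits (-n).toNat with
        | nil => exact absurd hq hnil
        | cons c B' => exact List.getLast?_cons_cons
      have h2 : ('b' :: pvBits (-n).toNat).getLast? = some 'b' := by
        rw [hpal, List.reverse_cons, List.getLast?_concat]
      rw [h1] at h2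
      have hmem : 'b' ∈ pvBits (-n).toNat := List.mem_of_getLast? h2
      rcases pvBits_digits (-n).toNat 'b' hmem with h | h <;> simp at h
    · rintro ⟨h0, -⟩; omega
  · subst hn
    simp [pvBits_zero]
  · simp only [if_neg (by omega : ¬ n < 0), if_neg (by omega : n ≠ 0)]
    constructor
    · rintro ⟨hpal, hcnt⟩
      refine ⟨by omega, ⟨by omega, hpal.symm, by omega⟩⟩
    · rintro ⟨-, -, hpal, hcnt⟩
      exact ⟨hpal.symm, by omega⟩

theorem nextHackLoop_eq (M : Int) (hM : pvGood M) :
    ∀ (fuel : Nat) (start : Int), (∀ k, start ≤ k → k < M → ¬ pvGood k) →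
      start ≤ M → M ≤ start + fuel → nextHackLoop fuel start = M := by
  intro fuel
  induction fuel with
  | zero =>
    intro start _ h1 h2
    have : start = M := by omega
    subst this
    rfl
  | succ fuel ih =>
    intro start hmin h1 h2
    rcases eq_or_lt_of_le h1 with heq | hlt
    · subst heq
      have hc := (pvBinTail_check start).2 hM
      unfold nextHackLoop
      rw [if_pos hc.1, if_pos hc.2]
    · have hnot : ¬ pvGood start := hmin start le_rfl hlt
      have hc : ¬ ((pvBinTail start = (pvBinTail start).reverse) ∧
          (pvBinTail start).count '1' % 2 ≠ 0) := fun h => hnot ((pvBinTail_check start).1 h)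
      have hrec : nextHackLoop (fuel + 1) start = nextHackLoop fuel (start + 1) := by
        conv_lhs => rw [nextHackLoop]
        by_cases hp : pvBinTail start = (pvBinTail start).reverse
        · rw [if_pos hp, if_neg (fun hcnt => hc ⟨hp, hcnt⟩)]
        · rw [if_neg hp]

      rw [hrec]
      exact ih (start + 1) (fun k hk1 hk2 => hmin k (by omega) hk2) (by omega) (by omega)

-- ----- the B-side loops find the least good integer > n -----

theorem pvInner_none (n : Int) (L h : Nat) (halves : List Nat)
    (hall : ∀ x ∈ halves,
      ¬ (n < (pvVal (pvCandP L h x) : Int) ∧ (pvCandP L h x).count '1' % 2 = 1)) :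
    pvInner n L h halves = none := by
  induction halves with
  | nil => rfl
  | cons y ys ih =>
    unfold pvInner
    rw [if_neg (hall y (by simp))]
    exact ih (fun x hx => hall x (by simp [hx]))

theorem pvInner_some (n : Int) (L h : Nat) (x₀ : Nat) (halves : List Nat)
    (hsort : halves.Pairwise (· < ·)) (hmem : x₀ ∈ halves)
    (hx₀ : n < (pvVal (pvCandP L h x₀) : Int) ∧ (pvCandP L h x₀).count '1' % 2 = 1)
    (hbefore : ∀ x ∈ halves, x < x₀ →
      ¬ (n < (pvVal (pvCandP L h x) : Int) ∧ (pvCandP L h x).count '1' % 2 = 1)) :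
    pvInner n L h halves = some ((pvVal (pvCandP L h x₀) : Nat) : Int) := by
  induction halves with
  | nil => cases hmem
  | cons y ys ih =>
    by_cases hy : y = x₀
    · subst hy
      unfold pvInner
      rw [if_pos hx₀]
    · have hmem' : x₀ ∈ ys := by
        rcases List.mem_cons.1 hmem with h1 | h1
        · exact absurd h1.symm hy
        · exact h1
      have hylt : y < x₀ := (List.pairwise_cons.1 hsort).1 x₀ hmem'
      unfold pvInner
      rw [if_neg (hbefore y (by simp) hylt)]
      exact ih (List.pairwise_cons.1 hsort).2 hmem'
        (fun x hx hlt => hbefore x (by simp [hx]) hlt)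

theorem pvCand_good (L x : Nat) (hL : 1 ≤ L)
    (hlenx : (pvBits x).length = (L + 1) / 2)
    (hcnt : (pvCandP L ((L + 1) / 2) x).count '1' % 2 = 1) :
    pvGoodN (pvVal (pvCandP L ((L + 1) / 2) x)) ∧ pvVal (pvCandP L ((L + 1) / 2) x) < 2 ^ L := by
  obtain ⟨hlp, hhd, hdg, hpalx, -⟩ := pvCand_spec L x hL hlenx
  have hbitsx : pvBits (pvVal (pvCandP L ((L + 1) / 2) x)) = pvCandP L ((L + 1) / 2) x :=
    pvBits_pvVal _ hdg hhd
  have hnex : pvVal (pvCandP L ((L + 1) / 2) x) ≠ 0 := by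
    obtain ⟨t, ht⟩ := hhd
    rw [ht, pvVal_cons_one]
    have := Nat.one_le_two_pow (n := t.length)
    omega
  refine ⟨⟨hnex, by rw [hbitsx]; exact hpalx, by rw [hbitsx]; exact hcnt⟩, ?_⟩
  have := pvVal_lt (pvCandP L ((L + 1) / 2) x)
  rw [hlp] at this
  exact this

theorem nextHackAltLoop_eq (n : Int) (MN : Nat) (hgood : pvGoodN MN) (hlt : n < (MN : Int))
    (hmin : ∀ k : Nat, n < (k : Int) → k < MN → ¬ pvGoodN k) :
    ∀ (fuel L : Nat), 1 ≤ L → L ≤ (pvBits MN).length →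
      (pvBits MN).length < L + fuel → nextHackAltLoop fuel n L = (MN : Int) := by
  obtain ⟨hMne, hMpal, hMcnt⟩ := hgood
  obtain ⟨hMlo, hMhi⟩ := pvBits_bounds MN hMne
  intro fuel
  induction fuel with
  | zero => intro L h1 h2 h3; omega
  | succ fuel ih =>
    intro L h1 h2 h3
    unfold nextHackAltLoop
    have hmono : (2:Nat) ^ ((L + 1) / 2 - 1) ≤ 2 ^ ((L + 1) / 2) :=
      Nat.pow_le_pow_right (by norm_num) (by omega)
    have hrange : ∀ x ∈ List.range' (2 ^ ((L + 1) / 2 - 1))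
        (2 ^ ((L + 1) / 2) - 2 ^ ((L + 1) / 2 - 1)),
        (pvBits x).length = (L + 1) / 2 := by
      intro x hx
      rw [List.mem_range'_1] at hx
      exact pvBits_length_of_range ((L + 1) / 2) x (by omega) hx.1 (by omega)
    rcases eq_or_lt_of_le h2 with heq | hLlt
    · -- L is exactly the bit-length of MN: the inner loop returns MN
      obtain ⟨hlenhalf, hpeq, hvalhalf⟩ :=
        pvCand_complete MN hMne hMpal L ((L + 1) / 2)
          (pvVal ((pvBits MN).take ((L + 1) / 2))) heq rfl rfl
      have hx0ne : pvVal ((pvBits MN).take ((L + 1) / 2)) ≠ 0 := by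
        intro h0
        rw [h0, pvBits_zero] at hlenhalf
        simp at hlenhalf
        omega
      have hx0range := pvBits_bounds _ hx0ne
      rw [hlenhalf] at hx0range
      have hx0mem : pvVal ((pvBits MN).take ((L + 1) / 2)) ∈ List.range' (2 ^ ((L + 1) / 2 - 1))
          (2 ^ ((L + 1) / 2) - 2 ^ ((L + 1) / 2 - 1)) := by
        rw [List.mem_range'_1]
        omega
      have hsome := pvInner_some n L ((L + 1) / 2) (pvVal ((pvBits MN).take ((L + 1) / 2))) _
        (List.pairwise_lt_range' 1) hx0mem
        ⟨by rw [hvalhalf]; exact hlt, by rw [hpeq]; exact hMcnt⟩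
        (fun x hx hxlt hpred => by
          have hlenx := hrange x hx
          obtain ⟨hgoodx, -⟩ := pvCand_good L x (by omega) hlenx hpred.2
          have hltM : pvVal (pvCandP L ((L + 1) / 2) x) < MN := by
            rw [← hvalhalf]
            exact pvCand_mono L (by omega) x _ hlenx hlenhalf hxlt
          exact hmin _ hpred.1 hltM hgoodx)
      rw [hsome, hvalhalf]
    · -- L below the bit-length of MN: no candidate at this level is admissible
      have hnone := pvInner_none n L ((L + 1) / 2) _ (fun x hx hpred => by
        have hlenx := hrange x hx
        obtain ⟨hgoodx, hsmall⟩ := pvCand_good L x (by omega) hlenx hpred.2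
        have h2L : (2:Nat) ^ L ≤ 2 ^ ((pvBits MN).length - 1) :=
          Nat.pow_le_pow_right (by norm_num) (by omega)
        exact hmin _ hpred.1 (by omega) hgoodx)
      rw [hnone]
      exact ih (L + 1) (by omega) (by omega) (by omega)

-- ----- the concrete witness 2^32 + 2^16 + 1 is good -----

set_option maxRecDepth 8000 in
theorem pvBits_witness :
    pvBits 4295032833
      = '1' :: (List.replicate 15 '0' ++ ['1'] ++ List.replicate 15 '0' ++ ['1']) := by
  have hval : pvVal ('1' :: (List.replicate 15 '0' ++ ['1'] ++ List.replicate 15 '0' ++ ['1']))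
      = 4295032833 := by decide
  rw [← hval]
  refine pvBits_pvVal _ ?_ ⟨_, rfl⟩
  intro c hc
  simp at hc
  tauto

theorem pvGoodN_witness : pvGoodN 4295032833 := by
  refine ⟨by norm_num, ?_, ?_⟩
  · rw [pvBits_witness]; decide
  · rw [pvBits_witness]; decide

theorem pvExistsLeast (p : Nat → Prop) (h : ∃ n, p n) : ∃ n, p n ∧ ∀ k, k < n → ¬ p k := by
  classical
  exact ⟨Nat.find h, Nat.find_spec h, fun k hk hpk => Nat.find_min h hk hpk⟩

-- ===== VERDICT (by name: the statement is the Claim_ definition above) =====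
theorem next_hack_spec : Claim_equal_next_hack := by
  intro n hdom
  unfold Dom_next_hack pvDomInt at hdom
  rw [decide_eq_true_eq] at hdom
  unfold Spec_next_hack
  -- the least good natural above n
  have hWgood := pvGoodN_witness
  have hWlt : n < (4295032833 : Int) := by omega
  obtain ⟨MN, ⟨hMlt, hMgood⟩, hMmin⟩ :=
    pvExistsLeast (fun m => n < (m : Int) ∧ pvGoodN m) ⟨4295032833, hWlt, hWgood⟩
  have hMle : MN ≤ 4295032833 := by
    by_contra hgt
    exact hMmin 4295032833 (by omega) ⟨hWlt, hWgood⟩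
  -- A returns MN
  have hA : next_hack n = (MN : Int) := by
    unfold next_hack
    refine nextHackLoop_eq (MN : Int) ⟨by have := hMgood.1; omega, by simpa using hMgood⟩
      (2 ^ 34) (n + 1) ?_ (by omega) ?_
    · intro k hk1 hk2 hkgood
      obtain ⟨hk0, hkgoodN⟩ := hkgood
      refine hMmin k.toNat (by omega) ⟨by omega, hkgoodN⟩
    · have : (2:Int) ^ 34 = 17179869184 := by norm_num
      omega
  -- B returns MN
  have hB : next_hack_alt n = (MN : Int) := by
    unfold next_hack_alt
    obtain ⟨hblo, hbhi⟩ := pvBits_bounds MN hMgood.1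
    have hLm1 : 1 ≤ (pvBits MN).length := by
      have := pvBits_ne_nil MN hMgood.1
      cases hq : pvBits MN with
      | nil => exact absurd hq this
      | cons x xs => simp
    have hLmle : (pvBits MN).length ≤ 33 := by
      by_contra hgt
      have : (2:Nat) ^ 33 ≤ 2 ^ ((pvBits MN).length - 1) :=
        Nat.pow_le_pow_right (by norm_num) (by omega)
      have : (2:Nat) ^ 33 ≤ MN := le_trans this hblo
      norm_num at this
      omega
    exact nextHackAltLoop_eq n MN hMgood hMlt
      (fun k hk1 hk2 hkgood => hMmin k hk2 ⟨hk1, hkgood⟩)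
      64 1 le_rfl hLm1 (by omega)
  rw [hA, hB]
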